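-- pv_equiv track=rewrite | github.com/trevordavid/leetcode | solutions/misc/max_appointments_in_range.py | maxAppointmentsInRange
-- ===== SOURCE A (Python) =====
-- from typing import List
--
-- def maxAppointmentsInRange(appointments: List[int], k: int) -> int:
--     # Sort the appointment times
--     appointments.sort()
--
--     max_count = 0
--     start = 0
--
--     # Use a sliding window approach
--     for end in range(len(appointments)):
--         # Expand the window by moving the end pointer
--         while appointments[end] - appointments[start] > k:
--             # Shrink the window from the start if the range exceeds k
--             start += 1
--         # Calculate the number of appointments in the current window
--         current_count = end - start + 1
--         # Update max_count if the current window has more appointments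
--         max_count = max(max_count, current_count)
--
--     return max_count
-- ===== SOURCE B (Python) =====
-- from typing import List
--
-- def _bisect_left(a: List[int], x: int) -> int:
--     lo, hi = 0, len(a)
--     while lo < hi:
--         mid = (lo + hi) // 2
--         if a[mid] < x:
--             lo = mid + 1
--         else:
--             hi = mid
--     return lo
--
-- def maxAppointmentsInRange(appointments: List[int], k: int) -> int:
--     # Sort in place, like the original
--     appointments.sort()
--     max_count = 0
--     for end in range(len(appointments)):
--         # leftmost index whose value is >= appointments[end] - k
--         lo = _bisect_left(appointments, appointments[end] - k)
--         max_count = max(max_count, end - lo + 1)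
--     return max_count
-- ===== Notes on version B (the rewrite author's own statement) =====
-- stated objective: alternative
-- what changed: Replaces the stateful two-pointer sliding window with a per-index binary search (hand-written bisect_left) into the sorted array; the carried start pointer disappears.
-- crash fix: On a non-empty list with k < 0 A's inner while loop runs the start pointer past the end of the list and raises IndexError; B returns 0 (no window of positive size has spread <= k). — e.g. on maxAppointmentsInRange([5], -1): A raises IndexError, B returns 0
import Mathlib
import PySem

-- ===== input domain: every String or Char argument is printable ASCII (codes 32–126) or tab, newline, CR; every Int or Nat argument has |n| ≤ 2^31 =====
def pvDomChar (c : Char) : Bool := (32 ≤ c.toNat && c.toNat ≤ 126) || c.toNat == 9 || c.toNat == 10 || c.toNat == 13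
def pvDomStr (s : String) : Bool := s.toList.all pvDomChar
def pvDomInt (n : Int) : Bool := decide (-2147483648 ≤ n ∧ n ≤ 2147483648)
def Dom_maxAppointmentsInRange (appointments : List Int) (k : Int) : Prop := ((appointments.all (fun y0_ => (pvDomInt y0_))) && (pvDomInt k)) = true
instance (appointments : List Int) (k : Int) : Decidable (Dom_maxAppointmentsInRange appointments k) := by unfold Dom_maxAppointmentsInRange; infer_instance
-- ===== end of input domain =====

-- B replaces A's stateful two-pointer window with a per-index hand-written binary search; same cost class, no speed claim.
-- Both A and B sort the list argument in place; the equivalence proved here is about the return value.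

-- ===== PORT A =====
-- inner `while appointments[end] - appointments[start] > k: start += 1`
-- (fuel-free: recursion bounded by the list length; out-of-range access, where Python raises, just stops — outside Pre_)
def advA (a : List Int) (k : Int) (e : Nat) (start : Nat) : Nat :=
  if h : start < a.length then
    if a[e]! - a[start]! > k then advA a k e (start + 1) else start
  else start
termination_by a.length - start
decreasing_by omega

def maxAppointmentsInRange (appointments : List Int) (k : Int) : Int :=
  let s := PySem.List.sorted appointments (fun x => x) false
  let r := (List.range s.length).foldl
    (fun (st : Int × Nat) e =>
      let start := advA s k e st.2
      (max st.1 ((e : Int) - (start : Int) + 1), start)) (0, 0)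
  r.1

-- ===== PORT B =====
-- hand-written bisect_left from Source B
def blB (a : List Int) (x : Int) (lo hi : Nat) : Nat :=
  if h : lo < hi then
    let mid := (lo + hi) / 2
    if a[mid]! < x then blB a x (mid + 1) hi else blB a x lo mid
  else lo
termination_by hi - lo
decreasing_by all_goals omega

def maxAppointmentsInRange_alt (appointments : List Int) (k : Int) : Int :=
  let s := PySem.List.sorted appointments (fun x => x) false
  (List.range s.length).foldl
    (fun (m : Int) (e : Nat) =>
      let lo := blB s (s[e]! - k) 0 s.length
      max m ((e : Int) - (lo : Int) + 1)) 0

-- ===== PRECONDITION & SPEC =====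
-- Pre_ excludes exactly the inputs where A raises: on a non-empty list with k < 0 the
-- while loop pushes start past the end of the list (IndexError).
def Pre_maxAppointmentsInRange (appointments : List Int) (k : Int) : Prop :=
  0 ≤ k ∨ appointments = []
instance (appointments : List Int) (k : Int) : Decidable (Pre_maxAppointmentsInRange appointments k) := by unfold Pre_maxAppointmentsInRange; infer_instance
def pvWitness_maxAppointmentsInRange : List Int × Int := ([3, 1, 7, 5], 2)

-- On a non-empty list with k < 0 A raises IndexError; B returns 0.
def Raises_maxAppointmentsInRange (appointments : List Int) (k : Int) : Prop :=
  k < 0 ∧ appointments ≠ []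
instance (appointments : List Int) (k : Int) : Decidable (Raises_maxAppointmentsInRange appointments k) := by unfold Raises_maxAppointmentsInRange; infer_instance
def pvRaiseWitness_maxAppointmentsInRange : List Int × Int := ([5], -1)
def pvRaiseWitnessOut_maxAppointmentsInRange : Int := 0

def Spec_maxAppointmentsInRange (appointments : List Int) (k : Int) (out : Int) : Prop := out = maxAppointmentsInRange_alt appointments k
instance (appointments : List Int) (k : Int) (out : Int) : Decidable (Spec_maxAppointmentsInRange appointments k out) := by unfold Spec_maxAppointmentsInRange; infer_instance

-- ===== CLAIM (what is proved, stated in full; the proofs are below) =====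
def Claim_equal_maxAppointmentsInRange : Prop := ∀ (appointments : List Int) (k : Int), Dom_maxAppointmentsInRange appointments k → Pre_maxAppointmentsInRange appointments k → Spec_maxAppointmentsInRange appointments k (maxAppointmentsInRange appointments k)
def Claim_raises_maxAppointmentsInRange : Prop := (∀ (appointments : List Int) (k : Int), Dom_maxAppointmentsInRange appointments k → Raises_maxAppointmentsInRange appointments k → ¬ Pre_maxAppointmentsInRange appointments k) ∧ (Dom_maxAppointmentsInRange (pvRaiseWitness_maxAppointmentsInRange.1) (pvRaiseWitness_maxAppointmentsInRange.2) ∧ Raises_maxAppointmentsInRange (pvRaiseWitness_maxAppointmentsInRange.1) (pvRaiseWitness_maxAppointmentsInRange.2) ∧ maxAppointmentsInRange_alt (pvRaiseWitness_maxAppointmentsInRange.1) (pvRaiseWitness_maxAppointmentsInRange.2) = pvRaiseWitnessOut_maxAppointmentsInRange)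

-- ===== LEMMAS AND PROOFS =====


-- sortedness of the common sorted list, in getElem! form
lemma sortedMono (xs : List Int) :
    ∀ i j, i ≤ j → j < (PySem.List.sorted xs (fun x => x) false).length →
      (PySem.List.sorted xs (fun x => x) false)[i]! ≤ (PySem.List.sorted xs (fun x => x) false)[j]! := by
  intro i j hij hj
  have hi : i < (PySem.List.sorted xs (fun x => x) false).length := lt_of_le_of_lt (by omega) hj
  rw [getElem!_pos _ i hi, getElem!_pos _ j hj]
  exact PySem.List.sorted_id_getElem_mono xs hij hj

-- characterisation of the hand-written bisect_left
lemma blB_spec (a : List Int) (x : Int)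
    (hmono : ∀ i j, i ≤ j → j < a.length → a[i]! ≤ a[j]!) :
    ∀ lo hi, hi ≤ a.length → lo ≤ hi →
      lo ≤ blB a x lo hi ∧ blB a x lo hi ≤ hi ∧
      (∀ i, lo ≤ i → i < blB a x lo hi → a[i]! < x) ∧
      (∀ i, blB a x lo hi ≤ i → i < hi → x ≤ a[i]!) := by
  intro lo hi
  fun_induction blB a x lo hi with
  | case1 lo hi h mid hlt ih =>
    intro hhi hlh
    have hmid : mid < a.length := by omega
    obtain ⟨h1, h2, h3, h4⟩ := ih hhi (by omega)
    refine ⟨by omega, h2, ?_, h4⟩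
    intro i hlo hi2
    by_cases hc : mid + 1 ≤ i
    · exact h3 i hc hi2
    · exact lt_of_le_of_lt (hmono i mid (by omega) hmid) hlt
  | case2 lo hi h mid hlt ih =>
    intro hhi hlh
    have hmid : mid < a.length := by omega
    obtain ⟨h1, h2, h3, h4⟩ := ih (by omega) (by omega)
    refine ⟨h1, by omega, h3, ?_⟩
    intro i hri hihi
    by_cases hc : i < mid
    · exact h4 i hri hc
    · exact le_trans (by omega) (hmono mid i (by omega) (by omega))
  | case3 lo hi h =>
    intro hhi hlh
    exact ⟨le_refl _, by omega, by omega, by omega⟩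

-- characterisation of A's inner while loop
lemma advA_spec (a : List Int) (k : Int) (e : Nat) (hk : 0 ≤ k) (he : e < a.length) :
    ∀ start, start ≤ e →
      start ≤ advA a k e start ∧ advA a k e start ≤ e ∧
      (∀ i, start ≤ i → i < advA a k e start → k < a[e]! - a[i]!) ∧
      a[e]! - a[advA a k e start]! ≤ k := by
  intro start
  fun_induction advA a k e start with
  | case1 start h hlt ih =>
    intro hs
    have hne : start ≠ e := by
      intro hc; subst hc; simp at hlt; omega
    obtain ⟨h1, h2, h3, h4⟩ := ih (by omega)
    refine ⟨by omega, h2, ?_, h4⟩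
    intro i hlo hi2
    by_cases hc : start + 1 ≤ i
    · exact h3 i hc hi2
    · have : i = start := by omega
      subst this; omega
  | case2 start h hlt =>
    intro hs
    exact ⟨le_refl _, hs, by omega, by omega⟩
  | case3 start h =>
    intro hs
    omega

-- the carried two-pointer start lands exactly where bisect_left does
lemma adv_eq_bl (a : List Int) (k : Int) (e : Nat) (hk : 0 ≤ k) (he : e < a.length)
    (hmono : ∀ i j, i ≤ j → j < a.length → a[i]! ≤ a[j]!)
    (start : Nat) (hs : start ≤ e)
    (hcarry : ∀ i, i < start → a[i]! < a[e]! - k) :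
    advA a k e start = blB a (a[e]! - k) 0 a.length := by
  obtain ⟨a1, a2, a3, a4⟩ := advA_spec a k e hk he start hs
  obtain ⟨b1, b2, b3, b4⟩ := blB_spec a (a[e]! - k) hmono 0 a.length (le_refl _) (by omega)
  set r1 := advA a k e start with hr1
  set r2 := blB a (a[e]! - k) 0 a.length with hr2
  rcases lt_trichotomy r1 r2 with h | h | h
  · -- a[r1]! ≥ x but r1 < r2 says a[r1]! < x
    have := b3 r1 (by omega) h
    omega
  · exact h
  · -- r2 < r1 ≤ e < len : a[r2]! ≥ x from b4, but a[r2]! < x from advA/hcarry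
    have hx : a[e]! - k ≤ a[r2]! := b4 r2 (le_refl _) (by omega)
    by_cases hc : r2 < start
    · have := hcarry r2 hc; omega
    · have := a3 r2 (by omega) h; omega

-- the two folds agree, with the window invariant carried along
lemma fold_eq (a : List Int) (k : Int) (hk : 0 ≤ k)
    (hmono : ∀ i j, i ≤ j → j < a.length → a[i]! ≤ a[j]!) :
    ∀ e, e ≤ a.length →
      (((List.range e).foldl
          (fun (st : Int × Nat) e =>
            let start := advA a k e st.2
            (max st.1 ((e : Int) - (start : Int) + 1), start)) (0, 0)).1 =
        (List.range e).foldl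
          (fun (m : Int) (e : Nat) =>
            let lo := blB a (a[e]! - k) 0 a.length
            max m ((e : Int) - (lo : Int) + 1)) 0) ∧
      (((List.range e).foldl
          (fun (st : Int × Nat) e =>
            let start := advA a k e st.2
            (max st.1 ((e : Int) - (start : Int) + 1), start)) (0, 0)).2 ≤ e ∧
        (∀ i, i < ((List.range e).foldl
          (fun (st : Int × Nat) e =>
            let start := advA a k e st.2
            (max st.1 ((e : Int) - (start : Int) + 1), start)) (0, 0)).2 →
          e < a.length → a[i]! < a[e]! - k)) := by
  intro e
  induction e with
  | zero => intro _; simp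
  | succ n ih =>
    intro hn
    have hnlt : n < a.length := by omega
    obtain ⟨ihm, ihs, ihp⟩ := ih (by omega)
    set stA := (List.range n).foldl
          (fun (st : Int × Nat) e =>
            let start := advA a k e st.2
            (max st.1 ((e : Int) - (start : Int) + 1), start)) (0, 0) with hstA
    have hcarry : ∀ i, i < stA.2 → a[i]! < a[n]! - k := fun i hi => ihp i hi hnlt
    have hadv := adv_eq_bl a k n hk hnlt hmono stA.2 ihs hcarry
    obtain ⟨a1, a2, a3, a4⟩ := advA_spec a k n hk hnlt stA.2 ihs
    constructor
    · simp only [List.range_succ, List.foldl_append, List.foldl_cons, List.foldl_nil, ← hstA]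
      rw [hadv, ihm]
    · constructor
      · simp only [List.range_succ, List.foldl_append, List.foldl_cons, List.foldl_nil, ← hstA]
        omega
      · simp only [List.range_succ, List.foldl_append, List.foldl_cons, List.foldl_nil, ← hstA]
        intro i hi hlen
        have hlt : a[i]! < a[n]! - k := by
          by_cases hc : i < stA.2
          · exact hcarry i hc
          · have := a3 i (by omega) hi; omega
        have : a[n]! ≤ a[n+1]! := hmono n (n+1) (by omega) hlen
        omega

-- ===== VERDICT (by name: the statement is the Claim_ definition above) =====
theorem maxAppointmentsInRange_spec : Claim_equal_maxAppointmentsInRange := by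
  intro appointments k _ hpre
  unfold Spec_maxAppointmentsInRange
  rcases hpre with hk | hnil
  · unfold maxAppointmentsInRange maxAppointmentsInRange_alt
    exact (fold_eq (PySem.List.sorted appointments (fun x => x) false) k hk
      (sortedMono appointments) _ (le_refl _)).1
  · subst hnil
    rfl

theorem maxAppointmentsInRange_raises : Claim_raises_maxAppointmentsInRange := by
  unfold Claim_raises_maxAppointmentsInRange
  refine ⟨fun a k _ hr => ?_, by decide, by decide, ?_⟩
  unfold Pre_maxAppointmentsInRange
  unfold Raises_maxAppointmentsInRange at hr
  rintro (h | h)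
  · omega
  · exact hr.2 h
  · show maxAppointmentsInRange_alt [5] (-1) = 0
    simp [maxAppointmentsInRange_alt, blB]

-- witness self-check: the raise witness really lies in the stated raise region
theorem maxAppointmentsInRange_raises_ok :
    Raises_maxAppointmentsInRange pvRaiseWitness_maxAppointmentsInRange.1 pvRaiseWitness_maxAppointmentsInRange.2 :=
  maxAppointmentsInRange_raises.2.2.1
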